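-- pv_equiv track=rewrite | github.com/sweisser15/Algorithms_and_DataStructures | Cipher.py | fillBlockDe
-- ===== SOURCE A (Python) =====
-- def fillBlockDe(userWord, blockSize):
--
--     # Fills in the block for prior to decryption
--     myList = []
--     numspaces = blockSize**2 - len(userWord)
--
--     #Creates a 2d array of the correct dimensions containing - as each value
--     for x in range(blockSize):
--         tempList = []
--         for y in range(blockSize):
--             tempList.append('-')
--         myList.append(tempList)
--
--     #Changes the - to * in the correct location. The amount of astericks is how much larger the block is than the word
--     for col in range(blockSize):
--         for row in reversed(range(blockSize)):
--             if numspaces > 0: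
--                 myList[row][col] = '*'
--                 numspaces = numspaces - 1
--
--     #Fills in the values of the user word into the decrypted location on the block.
--     currentPosition = len(userWord)
--     for i in reversed(range(blockSize)):
--         for j in reversed(range(blockSize)):
--             if myList[i][j] == '-':
--                 myList[i][j] = userWord[currentPosition - 1]
--                 currentPosition = currentPosition - 1
--     return myList
-- ===== SOURCE B (Python) =====
-- def fillBlockDe(userWord, blockSize):
--     # One-pass build: each cell is computed directly from its column-major
--     # bottom-up index, no grid mutation or overwriting passes.
--     numspaces = blockSize ** 2 - len(userWord)
--     k = max(0, len(userWord) - blockSize ** 2)  # first word char used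
--     grid = []
--     for row in range(blockSize):
--         rowCells = []
--         for col in range(blockSize):
--             if col * blockSize + (blockSize - 1 - row) < numspaces:
--                 rowCells.append('*')
--             else:
--                 rowCells.append(userWord[k])
--                 k += 1
--         grid.append(rowCells)
--     return grid
-- ===== Notes on version B (the rewrite author's own statement) =====
-- stated objective: simpler
-- what changed: A's three mutation passes (build a '-' grid, overwrite '*' column-major bottom-up with a countdown, then re-scan backwards filling word characters into remaining '-' cells) are replaced by a single pass that builds each row directly, deciding star-vs-letter per cell from its closed-form column-major index.
import Mathlib
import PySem

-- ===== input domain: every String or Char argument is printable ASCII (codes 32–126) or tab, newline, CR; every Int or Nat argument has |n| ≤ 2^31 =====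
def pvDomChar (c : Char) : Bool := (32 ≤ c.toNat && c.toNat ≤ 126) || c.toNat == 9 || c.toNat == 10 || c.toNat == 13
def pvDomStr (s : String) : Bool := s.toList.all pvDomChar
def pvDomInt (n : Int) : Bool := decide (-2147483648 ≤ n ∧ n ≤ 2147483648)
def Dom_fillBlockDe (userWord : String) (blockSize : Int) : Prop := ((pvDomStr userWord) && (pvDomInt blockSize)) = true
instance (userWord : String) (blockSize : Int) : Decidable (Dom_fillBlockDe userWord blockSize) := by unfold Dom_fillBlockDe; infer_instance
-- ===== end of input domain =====

-- B builds the grid in one pass with a per-cell closed-form star test instead of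
-- A's three mutation passes (objective: simpler; same asymptotic cost).

-- shared helper: a Python str as the list of its one-character strings
def pvWord (u : String) : List String := u.toList.map (fun c => String.ofList [c])

-- Int-indexed 2D read/write, exact since every index used is produced by range() and in bounds
def pvCellI (G : List (List String)) (r c : Int) : String :=
  PySem.List.pyGetD (PySem.List.pyGetD G r []) c ""
def pvSetI (G : List (List String)) (r c : Int) (v : String) : List (List String) :=
  PySem.List.pySetD G r (PySem.List.pySetD (PySem.List.pyGetD G r []) c v)

-- ===== PORT A =====
def fillBlockDe (userWord : String) (blockSize : Int) : List (List String) :=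
  let word : List String := pvWord userWord
  let numspaces : Int := blockSize ^ 2 - PySem.List.len word
  -- pass 1: build the all '-' grid
  let myList : List (List String) :=
    (PySem.List.pyRange 0 blockSize).foldl (fun acc _ =>
      acc ++ [(PySem.List.pyRange 0 blockSize).foldl (fun t _ => t ++ ["-"]) []]) []
  -- pass 2: '-' → '*' column-major bottom-up while numspaces > 0
  let st1 :=
    (PySem.List.pyRange 0 blockSize).foldl (fun st col =>
      (PySem.List.pyRange 0 blockSize).reverse.foldl (fun st row =>
        if st.2 > 0 then (pvSetI st.1 row col "*", st.2 - 1) else st) st)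
      (myList, numspaces)
  -- pass 3: fill remaining '-' cells backwards with the word's characters
  let st2 :=
    (PySem.List.pyRange 0 blockSize).reverse.foldl (fun st i =>
      (PySem.List.pyRange 0 blockSize).reverse.foldl (fun st j =>
        if pvCellI st.1 i j == "-" then
          (pvSetI st.1 i j (PySem.List.pyGetD word (st.2 - 1) ""), st.2 - 1)
        else st) st)
      (st1.1, PySem.List.len word)
  st2.1

-- ===== PORT B =====
def fillBlockDe_alt (userWord : String) (blockSize : Int) : List (List String) :=
  let word : List String := pvWord userWord
  let numspaces : Int := blockSize ^ 2 - PySem.List.len word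
  let st :=
    (PySem.List.pyRange 0 blockSize).foldl (fun (st : List (List String) × Int) row =>
      let rc :=
        (PySem.List.pyRange 0 blockSize).foldl (fun (rc : List String × Int) col =>
          if col * blockSize + (blockSize - 1 - row) < numspaces then
            (rc.1 ++ ["*"], rc.2)
          else
            (rc.1 ++ [PySem.List.pyGetD word rc.2 ""], rc.2 + 1)) (([] : List String), st.2)
      (st.1 ++ [rc.1], rc.2))
      (([] : List (List String)), max 0 (PySem.List.len word - blockSize ^ 2))
  st.1

-- ===== PRECONDITION & SPEC =====
def Spec_fillBlockDe (userWord : String) (blockSize : Int) (out : List (List String)) : Prop := out = fillBlockDe_alt userWord blockSize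
instance (userWord : String) (blockSize : Int) (out : List (List String)) : Decidable (Spec_fillBlockDe userWord blockSize out) := by unfold Spec_fillBlockDe; infer_instance

-- ===== CLAIM (what is proved, stated in full; the proofs are below) =====
def Claim_equal_fillBlockDe : Prop := ∀ (userWord : String) (blockSize : Int), Dom_fillBlockDe userWord blockSize → Spec_fillBlockDe userWord blockSize (fillBlockDe userWord blockSize)

-- ===== LEMMAS AND PROOFS =====

-- Nat-indexed 2D read/write used by the proofs
def pvGet (G : List (List String)) (p : Nat × Nat) : String := (G.getD p.1 []).getD p.2 ""
def pvSetN (G : List (List String)) (p : Nat × Nat) (v : String) : List (List String) :=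
  G.set p.1 ((G.getD p.1 []).set p.2 v)
def pvIn (G : List (List String)) (p : Nat × Nat) : Prop :=
  p.1 < G.length ∧ p.2 < (G.getD p.1 []).length

-- cell traversal orders
def pvCellsRM (N : Nat) : List (Nat × Nat) :=
  (List.range N).flatMap (fun r => (List.range N).map (fun c => (r, c)))
def pvCellsCM (N : Nat) : List (Nat × Nat) :=
  (List.range N).flatMap (fun c => ((List.range N).reverse).map (fun r => (r, c)))
def pvColIdx (N : Nat) (p : Nat × Nat) : Nat := p.2 * N + (N - 1 - p.1)
def pvStar (N : Nat) (ns : Int) (p : Nat × Nat) : Bool := decide ((pvColIdx N p : Int) < ns)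

def pvWAt (w : List String) (i : Int) : String := PySem.List.pyGetD w i ""

-- the loop bodies of A's passes, Nat-indexed
def pvStep2 (st : List (List String) × Int) (p : Nat × Nat) : List (List String) × Int :=
  if st.2 > 0 then (pvSetN st.1 p "*", st.2 - 1) else st
def pvStep3 (w : List String) (st : List (List String) × Int) (p : Nat × Nat) :
    List (List String) × Int :=
  if pvGet st.1 p == "-" then (pvSetN st.1 p (pvWAt w (st.2 - 1)), st.2 - 1) else st

-- sequential character assignment (what A's pass 3 does to the dash cells)
def pvAssign (w : List String) : List (List String) → List (Nat × Nat) → Int → List (List String)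
  | G, [], _ => G
  | G, p :: ps, cp => pvAssign w (pvSetN G p (pvWAt w (cp - 1))) ps (cp - 1)

-- B's row/grid builders (shape of B's fold, extracted)
def pvRowB (N : Nat) (ns : Int) (w : List String) (r : Nat) : List Nat → Int → List String
  | [], _ => []
  | c :: cs, k =>
    if pvStar N ns (r, c) then "*" :: pvRowB N ns w r cs k
    else pvWAt w k :: pvRowB N ns w r cs (k + 1)
def pvCntRow (N : Nat) (ns : Int) (r : Nat) : Nat :=
  (List.range N).countP (fun c => !pvStar N ns (r, c))
def pvGridB (N : Nat) (ns : Int) (w : List String) : List Nat → Int → List (List String)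
  | [], _ => []
  | r :: rs, k => pvRowB N ns w r (List.range N) k :: pvGridB N ns w rs (k + pvCntRow N ns r)

-- ---------- basic grid lemmas ----------
theorem pv_len_set (G : List (List String)) (p : Nat × Nat) (v : String) :
    (pvSetN G p v).length = G.length := by
  simp [pvSetN]

theorem pv_rowlen_set (G : List (List String)) (p : Nat × Nat) (v : String) (j : Nat) :
    ((pvSetN G p v).getD j []).length = (G.getD j []).length := by
  simp only [pvSetN, List.getD_eq_getElem?_getD, List.getElem?_set]
  split
  · next h =>
    subst h
    split
    · next h2 => simp [List.getElem?_eq_getElem h2, List.getD_eq_getElem?_getD]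
    · next h2 => rw [List.getElem?_eq_none (by omega)]
  · rfl

theorem pv_get_set_same (G : List (List String)) (p : Nat × Nat) (v : String) (h : pvIn G p) :
    pvGet (pvSetN G p v) p = v := by
  obtain ⟨h1, h2⟩ := h
  simp only [pvGet, pvSetN, List.getD_eq_getElem?_getD, List.getElem?_set_self h1,
    Option.getD_some]
  rw [List.getElem?_set_self (by simpa using h2)]
  rfl

theorem pv_get_set_ne (G : List (List String)) (p q : Nat × Nat) (v : String) (h : q ≠ p) :
    pvGet (pvSetN G p v) q = pvGet G q := by
  obtain ⟨p1, p2⟩ := p; obtain ⟨q1, q2⟩ := q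
  by_cases h1 : p1 = q1
  · subst h1
    have h2 : p2 ≠ q2 := fun h2 => h (by simp [h2])
    simp only [pvGet, pvSetN, List.getD_eq_getElem?_getD, List.getElem?_set]
    by_cases hlt : p1 < G.length
    · simp [hlt, List.getElem?_set, h2, List.getElem?_eq_getElem hlt]
    · simp [hlt, List.getElem?_eq_none (l := G) (Nat.le_of_not_lt hlt)]
  · simp only [pvGet, pvSetN, List.getD_eq_getElem?_getD, List.getElem?_set_ne h1]

theorem pv_in_set (G : List (List String)) (p q : Nat × Nat) (v : String) (h : pvIn G q) :
    pvIn (pvSetN G p v) q := by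
  obtain ⟨h1, h2⟩ := h
  exact ⟨by simpa [pvSetN] using h1, by rw [pv_rowlen_set]; exact h2⟩

-- ---------- pass 1 ----------
theorem pv_snoc_fold {α β : Type} (l : List α) (x : β) (acc : List β) :
    l.foldl (fun a _ => a ++ [x]) acc = acc ++ List.replicate l.length x := by
  induction l generalizing acc with
  | nil => simp
  | cons y ys ih => simp [ih, List.replicate_succ]

-- ---------- pass 2 ----------
theorem pv_pass2_get (cells : List (Nat × Nat)) (G : List (List String)) (cnt : Int)
    (hnd : cells.Nodup) (hin : ∀ p ∈ cells, pvIn G p) (q : Nat × Nat) :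
    pvGet ((cells.foldl pvStep2 (G, cnt)).1) q =
      if q ∈ cells ∧ (cells.idxOf q : Int) < cnt then "*" else pvGet G q := by
  induction cells generalizing G cnt with
  | nil => simp
  | cons p ps ih =>
    obtain ⟨hp, hnd'⟩ := List.nodup_cons.mp hnd
    have hinp : pvIn G p := hin p (List.mem_cons_self)
    have hin' : ∀ x ∈ ps, pvIn G x := fun x hx => hin x (List.mem_cons_of_mem _ hx)
    simp only [List.foldl_cons]
    by_cases hc : cnt > 0
    · have hstep : pvStep2 (G, cnt) p = (pvSetN G p "*", cnt - 1) := by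
        simp [pvStep2, hc]
      rw [hstep, ih _ _ hnd' (fun x hx => pv_in_set _ _ _ _ (hin' x hx))]
      by_cases hq : q = p
      · subst hq
        rw [if_neg (fun hh => hp hh.1), pv_get_set_same _ _ _ hinp,
          if_pos ⟨List.mem_cons_self, by rw [List.idxOf_cons_self]; exact_mod_cast hc⟩]
      · rw [pv_get_set_ne G p q _ hq]
        have hidx : (p :: ps).idxOf q = ps.idxOf q + 1 := List.idxOf_cons_ne _ (fun hh => hq hh.symm)
        have hiff : (q ∈ ps ∧ (ps.idxOf q : Int) < cnt - 1) ↔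
            (q ∈ p :: ps ∧ ((p :: ps).idxOf q : Int) < cnt) := by
          rw [hidx]
          constructor
          · rintro ⟨hm, hi⟩; exact ⟨List.mem_cons_of_mem _ hm, by push_cast; omega⟩
          · rintro ⟨hm, hi⟩
            refine ⟨(List.mem_cons.mp hm).resolve_left hq, ?_⟩
            push_cast at hi ⊢; omega
        rw [if_congr hiff rfl rfl]
    · have hstep : pvStep2 (G, cnt) p = (G, cnt) := by simp [pvStep2, hc]
      rw [hstep, ih _ _ hnd' hin']
      have h1 : ¬(q ∈ ps ∧ (ps.idxOf q : Int) < cnt) := by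
        rintro ⟨-, hi⟩; omega
      have h2 : ¬(q ∈ p :: ps ∧ ((p :: ps).idxOf q : Int) < cnt) := by
        rintro ⟨-, hi⟩; omega
      rw [if_neg h1, if_neg h2]

-- ---------- pass 3 ----------
theorem pv_pass3_eq_assign (w : List String) (cells : List (Nat × Nat))
    (G : List (List String)) (cp : Int) (hnd : cells.Nodup) (hin : ∀ p ∈ cells, pvIn G p) :
    (cells.foldl (pvStep3 w) (G, cp)).1 =
      pvAssign w G (cells.filter (fun p => pvGet G p == "-")) cp := by
  induction cells generalizing G cp with
  | nil => simp [pvAssign]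
  | cons p ps ih =>
    obtain ⟨hp, hnd'⟩ := List.nodup_cons.mp hnd
    have hinp : pvIn G p := hin p (List.mem_cons_self)
    have hin' : ∀ x ∈ ps, pvIn G x := fun x hx => hin x (List.mem_cons_of_mem _ hx)
    simp only [List.foldl_cons]
    by_cases hd : pvGet G p == "-"
    · have hstep : pvStep3 w (G, cp) p = (pvSetN G p (pvWAt w (cp - 1)), cp - 1) := by
        simp [pvStep3, hd]
      rw [hstep, ih _ _ hnd' (fun x hx => pv_in_set _ _ _ _ (hin' x hx))]
      have hfc : ps.filter (fun x => pvGet (pvSetN G p (pvWAt w (cp - 1))) x == "-") =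
          ps.filter (fun x => pvGet G x == "-") :=
        List.filter_congr (fun x hx => by
          rw [pv_get_set_ne G p x _ (fun hh => hp (hh ▸ hx))])
      rw [hfc]
      simp only [List.filter_cons, hd, if_true, pvAssign]
    · have hstep : pvStep3 w (G, cp) p = (G, cp) := by simp [pvStep3, hd]
      rw [hstep, ih _ _ hnd' hin']
      simp only [List.filter_cons, hd, if_false]
      simp [hd]

theorem pv_assign_get (w : List String) (ps : List (Nat × Nat)) (G : List (List String))
    (cp : Int) (hnd : ps.Nodup) (hin : ∀ p ∈ ps, pvIn G p) (q : Nat × Nat) :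
    pvGet (pvAssign w G ps cp) q =
      if q ∈ ps then pvWAt w (cp - 1 - ps.idxOf q) else pvGet G q := by
  induction ps generalizing G cp with
  | nil => simp [pvAssign]
  | cons p ps ih =>
    obtain ⟨hp, hnd'⟩ := List.nodup_cons.mp hnd
    have hinp : pvIn G p := hin p (List.mem_cons_self)
    have hin' : ∀ x ∈ ps, pvIn G x := fun x hx => hin x (List.mem_cons_of_mem _ hx)
    rw [pvAssign, ih _ _ hnd' (fun x hx => pv_in_set _ _ _ _ (hin' x hx))]
    by_cases hq : q = p
    · subst hq
      rw [if_neg hp, pv_get_set_same _ _ _ hinp,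
        if_pos List.mem_cons_self, List.idxOf_cons_self]
      norm_num
    · rw [pv_get_set_ne G p q _ hq]
      have hidx : (p :: ps).idxOf q = ps.idxOf q + 1 := List.idxOf_cons_ne _ (fun hh => hq hh.symm)
      by_cases hm : q ∈ ps
      · rw [if_pos hm, if_pos (List.mem_cons_of_mem _ hm), hidx]
        congr 1
        push_cast; ring
      · rw [if_neg hm, if_neg (fun hh => hm ((List.mem_cons.mp hh).resolve_left hq))]

-- ---------- traversal lists ----------
theorem pv_mem_cellsRM (N : Nat) (p : Nat × Nat) :
    p ∈ pvCellsRM N ↔ p.1 < N ∧ p.2 < N := by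
  cases p; simp [pvCellsRM, and_comm]

theorem pv_mem_cellsCM (N : Nat) (p : Nat × Nat) :
    p ∈ pvCellsCM N ↔ p.1 < N ∧ p.2 < N := by
  cases p; simp [pvCellsCM, and_comm]

theorem pv_idxOf_map {α β : Type} [BEq α] [LawfulBEq α] [BEq β] [LawfulBEq β] (f : α → β)
    (hf : Function.Injective f) (l : List α) (a : α) :
    (l.map f).idxOf (f a) = l.idxOf a := by
  induction l with
  | nil => rfl
  | cons x xs ih =>
    by_cases hx : x = a
    · subst hx; simp [List.idxOf_cons_self]
    · rw [List.map_cons,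
        List.idxOf_cons_ne (List.map f xs) (show f x ≠ f a from fun hh => hx (hf hh)),
        List.idxOf_cons_ne xs (show x ≠ a from hx), ih]

theorem pv_nodup_cellsRM (N : Nat) : (pvCellsRM N).Nodup := by
  rw [pvCellsRM, List.nodup_flatMap]
  refine ⟨fun r _ => ?_, ?_⟩
  · exact (List.nodup_range).map
      (show Function.Injective (fun c => (r, c)) from
        fun a b h => by simpa using congrArg Prod.snd h)
  · refine (List.nodup_range (n := N)).imp ?_
    intro a b hab x hxa hxb
    obtain ⟨c, -, rfl⟩ := List.mem_map.mp hxa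
    obtain ⟨c', -, he⟩ := List.mem_map.mp hxb
    have hba : b = a := by simpa using congrArg Prod.fst he
    exact hab hba.symm

theorem pv_nodup_cellsCM (N : Nat) : (pvCellsCM N).Nodup := by
  rw [pvCellsCM, List.nodup_flatMap]
  refine ⟨fun c _ => ?_, ?_⟩
  · exact (List.nodup_reverse.mpr List.nodup_range).map
      (show Function.Injective (fun r => (r, c)) from
        fun a b h => by simpa using congrArg Prod.fst h)
  · refine (List.nodup_range (n := N)).imp ?_
    intro a b hab x hxa hxb
    obtain ⟨r, -, rfl⟩ := List.mem_map.mp hxa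
    obtain ⟨r', -, he⟩ := List.mem_map.mp hxb
    have hba : b = a := by simpa using congrArg Prod.snd he
    exact hab hba.symm

theorem pv_len_cellsRM (N : Nat) : (pvCellsRM N).length = N * N := by
  simp [pvCellsRM, List.length_flatMap]

theorem pv_idxOf_range (N c : Nat) (hc : c < N) : (List.range N).idxOf c = c := by
  have := (List.nodup_range (n := N)).idxOf_getElem (i := c) (by simpa using hc)
  simpa using this

theorem pv_idxOf_cellsRM (N : Nat) (r c : Nat) (hr : r < N) (hc : c < N) :
    (pvCellsRM N).idxOf (r, c) = r * N + c := by
  rw [pvCellsRM]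
  set f := fun rr => (List.range N).map (fun c => (rr, c)) with hf
  have hsplit : List.range N
      = List.range r ++ ([r] ++ (List.range (N - (r + 1))).map (fun k => (r + 1) + k)) := by
    rw [← List.append_assoc, ← List.range_succ, ← List.range_add]
    congr 1; omega
  rw [hsplit, List.flatMap_append]
  have hA : (r, c) ∉ (List.range r).flatMap f := by
    simp only [hf, List.mem_flatMap, List.mem_range, List.mem_map]
    rintro ⟨rr, hrr, c', -, he⟩
    cases he; omega
  rw [List.idxOf_append_of_notMem hA, List.flatMap_append]
  have hB : (r, c) ∈ [r].flatMap f := by simp [hf, hc]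
  rw [List.idxOf_append_of_mem hB]
  have hlen : ((List.range r).flatMap f).length = r * N := by
    simp [List.length_flatMap, hf, List.map_const', List.sum_replicate, Nat.mul_comm]
  have hidx : ([r].flatMap f).idxOf (r, c) = c := by
    simp only [List.flatMap_cons, List.flatMap_nil, List.append_nil, hf]
    have h := pv_idxOf_map (fun c => (r, c))
      (fun a b h => by simpa using congrArg Prod.snd h) (List.range N) c
    rw [pv_idxOf_range N c hc] at h
    exact h
  rw [hlen, hidx]

theorem pv_idxOf_range_rev (N r : Nat) (hr : r < N) :
    (List.range N).reverse.idxOf r = N - 1 - r := by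
  have h1 : (List.range N).reverse[N - 1 - r]'(by simp; omega) = r := by
    rw [List.getElem_reverse]
    simp only [List.length_range, List.getElem_range]
    omega
  have h2 := (List.nodup_reverse.mpr (List.nodup_range (n := N))).idxOf_getElem
    (i := N - 1 - r) (by simp; omega)
  rw [h1] at h2
  exact h2

theorem pv_idxOf_cellsCM (N : Nat) (r c : Nat) (hr : r < N) (hc : c < N) :
    (pvCellsCM N).idxOf (r, c) = pvColIdx N (r, c) := by
  rw [pvCellsCM]
  set f := fun cc => ((List.range N).reverse).map (fun r => (r, cc)) with hf
  have hsplit : List.range N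
      = List.range c ++ ([c] ++ (List.range (N - (c + 1))).map (fun k => (c + 1) + k)) := by
    rw [← List.append_assoc, ← List.range_succ, ← List.range_add]
    congr 1; omega
  rw [hsplit, List.flatMap_append]
  have hA : (r, c) ∉ (List.range c).flatMap f := by
    simp only [hf, List.mem_flatMap, List.mem_range, List.mem_map, List.mem_reverse]
    rintro ⟨cc, hcc, r', -, he⟩
    cases he; omega
  rw [List.idxOf_append_of_notMem hA, List.flatMap_append]
  have hB : (r, c) ∈ [c].flatMap f := by simp [hf, hr]
  rw [List.idxOf_append_of_mem hB]
  have hlen : ((List.range c).flatMap f).length = c * N := by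
    simp [List.length_flatMap, hf, List.map_const', List.sum_replicate, Nat.mul_comm]
  have hidx : ([c].flatMap f).idxOf (r, c) = N - 1 - r := by
    simp only [List.flatMap_cons, List.flatMap_nil, List.append_nil, hf]
    have h := pv_idxOf_map (fun r => (r, c))
      (fun a b h => by simpa using congrArg Prod.fst h) ((List.range N).reverse) r
    rw [pv_idxOf_range_rev N r hr] at h
    exact h
  rw [hlen, hidx, pvColIdx]

theorem pv_cellsCM_flatten (N : Nat) :
    (List.range N).flatMap
        (fun c => ((List.range N).reverse).map (fun r => (r, c))) = pvCellsCM N := rfl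

theorem pv_cellsRMrev (N : Nat) :
    (List.range N).reverse.flatMap
        (fun r => ((List.range N).reverse).map (fun c => (r, c))) = (pvCellsRM N).reverse := by
  calc (List.range N).reverse.flatMap (fun r => ((List.range N).reverse).map (fun c => (r, c)))
      = (List.range N).reverse.flatMap
          (List.reverse ∘ fun r => (List.range N).map (fun c => (r, c))) := by
        simp [Function.comp_def, List.map_reverse]
    _ = (pvCellsRM N).reverse := (List.reverse_flatMap).symm

-- idxOf in a reversed Nodup list
theorem pv_idxOf_reverse {α : Type} [BEq α] [LawfulBEq α] (l : List α) (hnd : l.Nodup) (a : α)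
    (ha : a ∈ l) : l.reverse.idxOf a = l.length - 1 - l.idxOf a := by
  have hi : l.idxOf a < l.length := List.idxOf_lt_length_of_mem ha
  have h1 : l.reverse[l.length - 1 - l.idxOf a]'(by simp; omega) = a := by
    rw [List.getElem_reverse]
    have h2 : l.length - 1 - (l.length - 1 - l.idxOf a) = l.idxOf a := by omega
    simp only [List.length_reverse, h2]
    exact List.getElem_idxOf hi
  have h3 := (List.nodup_reverse.mpr hnd).idxOf_getElem
    (i := l.length - 1 - l.idxOf a) (by simp; omega)
  rw [h1] at h3
  exact h3

-- idxOf within a filtered list counts matching predecessors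
theorem pv_idxOf_filter {α : Type} [BEq α] [LawfulBEq α] (P : α → Bool) (l : List α) (a : α)
    (ha : a ∈ l) (hp : P a = true) :
    (l.filter P).idxOf a = (l.take (l.idxOf a)).countP P := by
  induction l with
  | nil => simp at ha
  | cons x xs ih =>
    by_cases hx : x = a
    · subst hx
      rw [List.idxOf_cons_self, List.take_zero, List.countP_nil,
        List.filter_cons_of_pos hp, List.idxOf_cons_self]
    · have hmem : a ∈ xs := (List.mem_cons.mp ha).resolve_left (fun hh => hx hh.symm)
      rw [List.idxOf_cons_ne xs (show x ≠ a from hx), List.take_succ_cons, List.countP_cons]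
      by_cases hPx : P x
      · rw [List.filter_cons_of_pos hPx,
          List.idxOf_cons_ne _ (show x ≠ a from hx), ih hmem]
        simp [hPx]
      · rw [List.filter_cons_of_neg hPx, ih hmem]
        simp [hPx]

-- ---------- star counting ----------
theorem pv_countP_lt_range (M : Nat) (ns : Int) :
    (List.range M).countP (fun k : Nat => decide ((k : Int) < ns)) = min M ns.toNat := by
  induction M with
  | zero => simp
  | succ M ih =>
    rw [List.range_succ, List.countP_append, ih]
    simp only [List.countP_cons, List.countP_nil]
    by_cases h : (M : Int) < ns
    · simp only [h, decide_true, if_true]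
      omega
    · simp [h]
      omega

theorem pv_map_colIdx_perm (N : Nat) :
    ((pvCellsRM N).map (pvColIdx N)).Perm (List.range (N * N)) := by
  have hinj : ∀ x ∈ pvCellsRM N, ∀ y ∈ pvCellsRM N, pvColIdx N x = pvColIdx N y → x = y := by
    rintro ⟨r, c⟩ hx ⟨r', c'⟩ hy he
    obtain ⟨hr, hc⟩ := (pv_mem_cellsRM N _).mp hx
    obtain ⟨hr', hc'⟩ := (pv_mem_cellsRM N _).mp hy
    simp only [pvColIdx] at he
    have hN : 0 < N := by omega
    have d1 : (c * N + (N - 1 - r)) / N = c := by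
      rw [Nat.mul_comm, Nat.mul_add_div hN, Nat.div_eq_of_lt (by omega)]
      omega
    have d2 : (c' * N + (N - 1 - r')) / N = c' := by
      rw [Nat.mul_comm, Nat.mul_add_div hN, Nat.div_eq_of_lt (by omega)]
      omega
    have hcc : c = c' := by rw [← d1, ← d2, he]
    subst hcc
    have : r = r' := by omega
    subst this; rfl
  have hnd : ((pvCellsRM N).map (pvColIdx N)).Nodup :=
    (pv_nodup_cellsRM N).map_on hinj
  have hsub : ((pvCellsRM N).map (pvColIdx N)) ⊆ List.range (N * N) := by
    intro k hk
    obtain ⟨⟨r, c⟩, hp, rfl⟩ := List.mem_map.mp hk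
    obtain ⟨hr, hc⟩ := (pv_mem_cellsRM N _).mp hp
    rw [List.mem_range, pvColIdx]
    calc c * N + (N - 1 - r) < c * N + N := by omega
      _ = (c + 1) * N := by ring
      _ ≤ N * N := Nat.mul_le_mul_right N (by omega)
  have hlen : List.length (List.range (N * N)) ≤ ((pvCellsRM N).map (pvColIdx N)).length := by
    rw [List.length_map, pv_len_cellsRM, List.length_range]
  exact (hnd.subperm hsub).perm_of_length_le hlen

theorem pv_countP_star_cellsRM (N : Nat) (ns : Int) :
    (pvCellsRM N).countP (pvStar N ns) = min (N * N) ns.toNat := by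
  have h1 : (pvCellsRM N).countP (pvStar N ns)
      = ((pvCellsRM N).map (pvColIdx N)).countP (fun k : Nat => decide ((k : Int) < ns)) := by
    rw [List.countP_map]; rfl
  rw [h1, (pv_map_colIdx_perm N).countP_eq, pv_countP_lt_range]

-- ---------- B's builders ----------
theorem pv_rowB_len (N : Nat) (ns : Int) (w : List String) (r : Nat) (cs : List Nat) (k : Int) :
    (pvRowB N ns w r cs k).length = cs.length := by
  induction cs generalizing k with
  | nil => rfl
  | cons c cs ih => by_cases h : pvStar N ns (r, c) <;> simp [pvRowB, h, ih]

theorem pv_gridB_len (N : Nat) (ns : Int) (w : List String) (rs : List Nat) (k : Int) :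
    (pvGridB N ns w rs k).length = rs.length := by
  induction rs generalizing k with
  | nil => rfl
  | cons r rs ih => simp [pvGridB, ih]

theorem pv_rowB_get (N : Nat) (ns : Int) (w : List String) (r : Nat) (cs : List Nat) (k : Int)
    (i : Nat) (h : i < cs.length) :
    (pvRowB N ns w r cs k)[i]'(by rw [pv_rowB_len]; exact h) =
      if pvStar N ns (r, cs[i]) then "*"
      else pvWAt w (k + ((cs.take i).countP (fun c => !pvStar N ns (r, c)) : Int)) := by
  induction cs generalizing k i with
  | nil => simp at h
  | cons c cs ih =>
    by_cases hstar : pvStar N ns (r, c)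
    · cases i with
      | zero => simp [pvRowB, hstar]
      | succ i =>
        have hi : i < cs.length := by simpa using h
        simp only [pvRowB, hstar, if_true, List.getElem_cons_succ, List.take_succ_cons,
          List.countP_cons, hstar]
        rw [ih k i hi]
        simp [hstar]
    · cases i with
      | zero => simp [pvRowB, hstar]
      | succ i =>
        have hi : i < cs.length := by simpa using h
        simp only [pvRowB, hstar, Bool.false_eq_true, if_false, List.getElem_cons_succ,
          List.take_succ_cons, List.countP_cons]
        rw [ih (k + 1) i hi]
        by_cases h2 : pvStar N ns (r, cs[i])
        · simp [h2]
        · simp only [h2, if_false, Bool.false_eq_true]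
          congr 1
          simp [hstar]
          push_cast
          ring

theorem pv_gridB_get (N : Nat) (ns : Int) (w : List String) (rs : List Nat) (k : Int)
    (i : Nat) (h : i < rs.length) :
    (pvGridB N ns w rs k)[i]'(by rw [pv_gridB_len]; exact h) =
      pvRowB N ns w rs[i] (List.range N)
        (k + (((rs.take i).map (pvCntRow N ns)).sum : Int)) := by
  induction rs generalizing k i with
  | nil => simp at h
  | cons r rs ih =>
    cases i with
    | zero => simp [pvGridB]
    | succ i =>
      have hi : i < rs.length := by simpa using h
      simp only [pvGridB, List.getElem_cons_succ, List.take_succ_cons, List.map_cons,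
        List.sum_cons]
      rw [ih (k + (pvCntRow N ns r : Int)) i hi]
      congr 1
      push_cast
      ring

-- B's inner fold is pvRowB
theorem pv_foldB_inner (N : Nat) (ns : Int) (w : List String) (r : Nat) (cs : List Nat)
    (acc : List String) (k : Int) :
    cs.foldl (fun rc c =>
        if pvStar N ns (r, c) then (rc.1 ++ ["*"], rc.2)
        else (rc.1 ++ [pvWAt w rc.2], rc.2 + 1)) (acc, k) =
      (acc ++ pvRowB N ns w r cs k, k + ((cs.countP (fun c => !pvStar N ns (r, c))) : Int)) := by
  induction cs generalizing acc k with
  | nil => simp [pvRowB]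
  | cons c cs ih =>
    by_cases hstar : pvStar N ns (r, c)
    · simp only [List.foldl_cons, hstar, if_true]
      rw [ih]
      simp [pvRowB, hstar, List.countP_cons]
    · simp only [List.foldl_cons, hstar, if_false]
      rw [ih]
      simp only [pvRowB, hstar, Bool.false_eq_true, if_false, List.countP_cons,
        Prod.mk.injEq]
      constructor
      · simp
      · push_cast
        simp [hstar]
        ring

theorem pv_foldB_outer (N : Nat) (ns : Int) (w : List String) (rs : List Nat)
    (accG : List (List String)) (k : Int) :
    rs.foldl (fun st r =>
        (st.1 ++ [((List.range N).foldl (fun rc c =>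
            if pvStar N ns (r, c) then (rc.1 ++ ["*"], rc.2)
            else (rc.1 ++ [pvWAt w rc.2], rc.2 + 1)) (([] : List String), st.2)).1],
         ((List.range N).foldl (fun rc c =>
            if pvStar N ns (r, c) then (rc.1 ++ ["*"], rc.2)
            else (rc.1 ++ [pvWAt w rc.2], rc.2 + 1)) (([] : List String), st.2)).2)) (accG, k) =
      (accG ++ pvGridB N ns w rs k, k + (((rs.map (pvCntRow N ns)).sum : Nat) : Int)) := by
  induction rs generalizing accG k with
  | nil => simp [pvGridB]
  | cons r rs ih =>
    simp only [List.foldl_cons]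
    rw [pv_foldB_inner]
    rw [ih]
    simp only [pvGridB, List.map_cons, List.sum_cons, pvCntRow, Prod.mk.injEq]
    constructor
    · simp
    · push_cast
      ring

-- ---------- complement count ----------
theorem pv_countP_not {α : Type} (l : List α) (p : α → Bool) :
    l.countP (fun a => !p a) = l.length - l.countP p := by
  induction l with
  | nil => rfl
  | cons x xs ih =>
    simp only [List.countP_cons, ih]
    have := List.countP_le_length (p := p) (l := xs)
    by_cases h : p x <;> simp [h] <;> omega

-- ---------- A's grid, Nat-indexed ----------
def pvG0 (N : Nat) : List (List String) := List.replicate N (List.replicate N "-")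
def pvGA (N : Nat) (ns : Int) (w : List String) : List (List String) :=
  ((pvCellsRM N).reverse.foldl (pvStep3 w)
    (((pvCellsCM N).foldl pvStep2 (pvG0 N, ns)).1, (w.length : Int))).1

theorem pv_in_G0 (N : Nat) (p : Nat × Nat) (h1 : p.1 < N) (h2 : p.2 < N) :
    pvIn (pvG0 N) p := by
  have hrow : (pvG0 N).getD p.1 [] = List.replicate N "-" := by
    rw [pvG0, List.getD_eq_getElem _ _ (by simpa using h1), List.getElem_replicate]
  refine ⟨by simpa [pvG0] using h1, ?_⟩
  rw [hrow]
  simpa using h2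

theorem pv_get_G0 (N : Nat) (p : Nat × Nat) (h1 : p.1 < N) (h2 : p.2 < N) :
    pvGet (pvG0 N) p = "-" := by
  have hrow : (pvG0 N).getD p.1 [] = List.replicate N "-" := by
    rw [pvG0, List.getD_eq_getElem _ _ (by simpa using h1), List.getElem_replicate]
  rw [pvGet, hrow, List.getD_eq_getElem _ _ (by simpa using h2), List.getElem_replicate]

theorem pv_shape2 (cells : List (Nat × Nat)) (G : List (List String)) (cnt : Int) :
    ((cells.foldl pvStep2 (G, cnt)).1).length = G.length ∧
      ∀ j, (((cells.foldl pvStep2 (G, cnt)).1).getD j []).length = (G.getD j []).length := by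
  induction cells generalizing G cnt with
  | nil => exact ⟨rfl, fun _ => rfl⟩
  | cons p ps ih =>
    simp only [List.foldl_cons, pvStep2]
    split
    · obtain ⟨ha, hb⟩ := ih (pvSetN G p "*") (cnt - 1)
      exact ⟨by rw [ha, pv_len_set], fun j => by rw [hb, pv_rowlen_set]⟩
    · exact ih G cnt

theorem pv_shape3 (w : List String) (cells : List (Nat × Nat)) (G : List (List String))
    (cp : Int) :
    ((cells.foldl (pvStep3 w) (G, cp)).1).length = G.length ∧
      ∀ j, (((cells.foldl (pvStep3 w) (G, cp)).1).getD j []).length = (G.getD j []).length := by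
  induction cells generalizing G cp with
  | nil => exact ⟨rfl, fun _ => rfl⟩
  | cons p ps ih =>
    simp only [List.foldl_cons, pvStep3]
    split
    · obtain ⟨ha, hb⟩ := ih (pvSetN G p (pvWAt w (cp - 1))) (cp - 1)
      exact ⟨by rw [ha, pv_len_set], fun j => by rw [hb, pv_rowlen_set]⟩
    · exact ih G cp

theorem pv_G1_get (N : Nat) (ns : Int) (i j : Nat) (hi : i < N) (hj : j < N) :
    pvGet (((pvCellsCM N).foldl pvStep2 (pvG0 N, ns)).1) (i, j) =
      if pvStar N ns (i, j) then "*" else "-" := by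
  rw [pv_pass2_get _ _ _ (pv_nodup_cellsCM N)
    (fun p hp => by
      obtain ⟨h1, h2⟩ := (pv_mem_cellsCM N p).mp hp
      exact pv_in_G0 N p h1 h2)]
  have hmem : (i, j) ∈ pvCellsCM N := (pv_mem_cellsCM N _).mpr ⟨hi, hj⟩
  rw [pv_idxOf_cellsCM N i j hi hj, pv_get_G0 N _ hi hj]
  by_cases hstar : pvStar N ns (i, j)
  · rw [if_pos ⟨hmem, by simpa [pvStar] using hstar⟩, if_pos hstar]
  · rw [if_neg (fun hh => hstar (by simpa [pvStar] using hh.2)), if_neg hstar]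

theorem pv_GA_get (N : Nat) (ns : Int) (w : List String) (i j : Nat)
    (hi : i < N) (hj : j < N) :
    pvGet (pvGA N ns w) (i, j) =
      if pvStar N ns (i, j) then "*"
      else pvWAt w ((w.length : Int)
        - ((pvCellsRM N).countP (fun p => !pvStar N ns p) : Int)
        + ((((pvCellsRM N).take (i * N + j)).countP (fun p => !pvStar N ns p)) : Int)) := by
  have hsh := pv_shape2 (pvCellsCM N) (pvG0 N) ns
  set G1 := ((pvCellsCM N).foldl pvStep2 (pvG0 N, ns)).1 with hG1
  have hinG1 : ∀ p : Nat × Nat, p.1 < N → p.2 < N → pvIn G1 p := by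
    intro p h1 h2
    obtain ⟨g1, g2⟩ := pv_in_G0 N p h1 h2
    exact ⟨by rw [hsh.1]; exact g1, by rw [hsh.2]; exact g2⟩
  rw [pvGA, pv_pass3_eq_assign w _ _ _ (List.nodup_reverse.mpr (pv_nodup_cellsRM N))
    (fun p hp => by
      obtain ⟨h1, h2⟩ := (pv_mem_cellsRM N p).mp (List.mem_reverse.mp hp)
      exact hinG1 p h1 h2)]
  have hfilter : (pvCellsRM N).reverse.filter (fun p => pvGet G1 p == "-") =
      ((pvCellsRM N).filter (fun p => !pvStar N ns p)).reverse := by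
    rw [List.filter_reverse]
    congr 1
    refine List.filter_congr ?_
    intro p hp
    obtain ⟨h1, h2⟩ := (pv_mem_cellsRM N p).mp hp
    obtain ⟨pi, pj⟩ := p
    rw [pv_G1_get N ns pi pj h1 h2]
    by_cases hstar : pvStar N ns (pi, pj)
    · rw [if_pos hstar, hstar]; decide
    · have hs : pvStar N ns (pi, pj) = false := by
        revert hstar; cases pvStar N ns (pi, pj) <;> simp
      rw [if_neg hstar, hs]; decide
  rw [hfilter]
  set F := (pvCellsRM N).filter (fun p => !pvStar N ns p) with hF
  have hndF : F.Nodup := (pv_nodup_cellsRM N).filter _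
  rw [pv_assign_get w _ _ _ (List.nodup_reverse.mpr hndF)
    (fun p hp => by
      obtain ⟨h1, h2⟩ := (pv_mem_cellsRM N p).mp
        (List.mem_of_mem_filter (List.mem_reverse.mp hp))
      exact hinG1 p h1 h2)]
  have hmemRM : (i, j) ∈ pvCellsRM N := (pv_mem_cellsRM N _).mpr ⟨hi, hj⟩
  by_cases hstar : pvStar N ns (i, j)
  · rw [if_neg (fun hh => by
      have := (List.mem_filter.mp (List.mem_reverse.mp hh)).2
      simp [hstar] at this)]
    rw [pv_G1_get N ns i j hi hj, if_pos hstar, if_pos hstar]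
  · have hmemF : (i, j) ∈ F := List.mem_filter.mpr ⟨hmemRM, by simp [hstar]⟩
    rw [if_pos (List.mem_reverse.mpr hmemF), if_neg hstar]
    have hidxF : F.idxOf (i, j) =
        ((pvCellsRM N).take ((pvCellsRM N).idxOf (i, j))).countP (fun p => !pvStar N ns p) :=
      pv_idxOf_filter _ _ _ hmemRM (by simp [hstar])
    rw [pv_idxOf_reverse F hndF _ hmemF]
    have hlenF : F.length = (pvCellsRM N).countP (fun p => !pvStar N ns p) :=
      (List.countP_eq_length_filter).symm
    have hlt : F.idxOf (i, j) < F.length := List.idxOf_lt_length_of_mem hmemF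
    rw [pv_idxOf_cellsRM N i j hi hj] at hidxF
    rw [hidxF] at hlt
    rw [hlenF] at hlt ⊢
    rw [hidxF]
    congr 1
    omega

-- ---------- prefix-count decomposition ----------
theorem pv_take_cellsRM (N i j : Nat) (hi : i < N) (hj : j ≤ N) :
    (pvCellsRM N).take (i * N + j) =
      (List.range i).flatMap (fun r => (List.range N).map (fun c => (r, c)))
        ++ (List.range j).map (fun c => (i, c)) := by
  rw [pvCellsRM]
  set f := fun rr => (List.range N).map (fun c => (rr, c)) with hf
  have hsplit : List.range N
      = List.range i ++ ([i] ++ (List.range (N - (i + 1))).map (fun k => (i + 1) + k)) := by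
    rw [← List.append_assoc, ← List.range_succ, ← List.range_add]
    congr 1; omega
  rw [hsplit, List.flatMap_append]
  have hlen : ((List.range i).flatMap f).length = i * N := by
    simp [List.length_flatMap, hf, List.map_const', List.sum_replicate, Nat.mul_comm]
  rw [List.take_append, List.take_of_length_le (by omega), hlen]
  have h2 : i * N + j - (i * N) = j := by omega
  have h3 : ([i].flatMap f).length = N := by simp [hf]
  rw [h2, List.flatMap_append, List.take_append_of_le_length (by omega)]
  congr 1
  simp only [hf, List.flatMap_cons, List.flatMap_nil, List.append_nil]
  rw [← List.map_take, List.take_range, Nat.min_eq_left hj]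

theorem pv_countP_take_decomp (N i j : Nat) (hi : i < N) (hj : j ≤ N)
    (P : Nat × Nat → Bool) :
    ((pvCellsRM N).take (i * N + j)).countP P =
      ((List.range i).map (fun r => (List.range N).countP (fun c => P (r, c)))).sum
        + (List.range j).countP (fun c => P (i, c)) := by
  rw [pv_take_cellsRM N i j hi hj, List.countP_append, List.countP_flatMap]
  simp [List.countP_map, Function.comp_def]

-- ---------- B's grid, entrywise ----------
theorem pv_GB_get (N : Nat) (ns : Int) (w : List String) (k0 : Int) (i j : Nat)
    (hi : i < N) (hj : j < N)
    (h1 : i < (pvGridB N ns w (List.range N) k0).length)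
    (h2 : j < ((pvGridB N ns w (List.range N) k0)[i]'h1).length) :
    ((pvGridB N ns w (List.range N) k0)[i]'h1)[j]'h2 =
      if pvStar N ns (i, j) then "*"
      else pvWAt w (k0 + (((List.range i).map (pvCntRow N ns)).sum : Int)
        + (((List.range j).countP (fun c => !pvStar N ns (i, c))) : Int)) := by
  have hg := pv_gridB_get N ns w (List.range N) k0 i (by simpa using hi)
  rw [List.getElem_range, List.take_range, Nat.min_eq_left hi.le] at hg
  have hr := pv_rowB_get N ns w i (List.range N)
    (k0 + (((List.range i).map (pvCntRow N ns)).sum : Int)) j (by simpa using hj)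
  rw [List.getElem_range, List.take_range, Nat.min_eq_left hj.le] at hr
  have hb : j < (pvRowB N ns w i (List.range N)
      (k0 + (((List.range i).map (pvCntRow N ns)).sum : Int))).length := by
    rw [pv_rowB_len]; simpa using hj
  have hopt : ((pvGridB N ns w (List.range N) k0)[i]'h1)[j]? =
      (pvRowB N ns w i (List.range N)
        (k0 + (((List.range i).map (pvCntRow N ns)).sum : Int)))[j]? := by
    rw [hg]
  rw [List.getElem?_eq_getElem h2, List.getElem?_eq_getElem hb] at hopt
  exact (Option.some.inj hopt).trans hr

-- ---------- the two grids agree ----------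
theorem pv_main (N : Nat) (w : List String)
    (ns : Int) (hns : ns = ((N * N : Nat) : Int) - (w.length : Int)) :
    pvGA N ns w =
      pvGridB N ns w (List.range N) (max 0 ((w.length : Int) - ((N * N : Nat) : Int))) := by
  set k0 : Int := max 0 ((w.length : Int) - ((N * N : Nat) : Int)) with hk0
  have hshape := pv_shape3 w (pvCellsRM N).reverse
    (((pvCellsCM N).foldl pvStep2 (pvG0 N, ns)).1) ((w.length : Int))
  have hshape2 := pv_shape2 (pvCellsCM N) (pvG0 N) ns
  have hlenA : (pvGA N ns w).length = N := by
    rw [pvGA, hshape.1, hshape2.1, pvG0, List.length_replicate]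
  have hlenB : (pvGridB N ns w (List.range N) k0).length = N := by
    rw [pv_gridB_len, List.length_range]
  apply List.ext_getElem (by rw [hlenA, hlenB])
  intro i h1 h2
  have hi : i < N := by rwa [hlenA] at h1
  have hrowA : ((pvGA N ns w)[i]'h1).length = N := by
    rw [← List.getD_eq_getElem _ [] h1, pvGA, hshape.2, hshape2.2, pvG0,
      List.getD_eq_getElem _ _ (by simpa using hi), List.getElem_replicate,
      List.length_replicate]
  have hgrow : (pvGridB N ns w (List.range N) k0)[i]'h2 =
      pvRowB N ns w i (List.range N)
        (k0 + (((List.range i).map (pvCntRow N ns)).sum : Int)) := by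
    have hg := pv_gridB_get N ns w (List.range N) k0 i (by simpa using hi)
    rw [List.getElem_range, List.take_range, Nat.min_eq_left hi.le] at hg
    exact hg
  have hrowB : ((pvGridB N ns w (List.range N) k0)[i]'h2).length = N := by
    rw [hgrow, pv_rowB_len, List.length_range]
  apply List.ext_getElem (by rw [hrowA, hrowB])
  intro j hj1 hj2
  have hj : j < N := by rwa [hrowA] at hj1
  have hA : ((pvGA N ns w)[i]'h1)[j]'hj1 = pvGet (pvGA N ns w) (i, j) := by
    rw [pvGet, List.getD_eq_getElem _ [] h1, List.getD_eq_getElem _ "" hj1]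
  have hB := pv_GB_get N ns w k0 i j hi hj h2 hj2
  rw [hA, hB, pv_GA_get N ns w i j hi hj]
  by_cases hstar : pvStar N ns (i, j)
  · rw [if_pos hstar, if_pos hstar]
  · rw [if_neg hstar, if_neg hstar]
    congr 1
    rw [pv_countP_take_decomp N i j hi hj.le (fun p => !pvStar N ns p)]
    have hcnt : pvCntRow N ns = fun r => (List.range N).countP (fun c => !pvStar N ns (r, c)) :=
      rfl
    rw [hcnt]
    have hm : (pvCellsRM N).countP (fun p => !pvStar N ns p)
        = N * N - min (N * N) ns.toNat := by
      rw [pv_countP_not, pv_len_cellsRM, pv_countP_star_cellsRM]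
    rw [hm]
    have hcle : min (N * N) ns.toNat ≤ N * N := Nat.min_le_left _ _
    push_cast [hcle]
    omega

-- ---------- connecting the ports to the Nat-indexed worlds ----------
theorem pv_setI_natCast (G : List (List String)) (r c : Nat) (v : String) :
    pvSetI G (r : Int) (c : Int) v = pvSetN G (r, c) v := by
  simp [pvSetI, pvSetN]

theorem pv_cellI_natCast (G : List (List String)) (r c : Nat) :
    pvCellI G (r : Int) (c : Int) = pvGet G (r, c) := by
  simp [pvCellI, pvGet]

theorem pv_foldl_congr {α β : Type} (l : List α) (f g : β → α → β) (init : β)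
    (h : ∀ b : β, ∀ x ∈ l, f b x = g b x) : l.foldl f init = l.foldl g init := by
  induction l generalizing init with
  | nil => rfl
  | cons x xs ih =>
    rw [List.foldl_cons, List.foldl_cons, h init x List.mem_cons_self]
    exact ih _ (fun b y hy => h b y (List.mem_cons_of_mem _ hy))

theorem pv_portA (u : String) (N : Nat) :
    fillBlockDe u (N : Int) =
      pvGA N (((N : Int)) ^ 2 - ((pvWord u).length : Int)) (pvWord u) := by
  unfold fillBlockDe pvGA
  simp only [PySem.List.pyRange_zero_nat, PySem.List.len_eq]
  rw [pv_snoc_fold, pv_snoc_fold]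
  simp only [List.nil_append, List.length_map, List.length_range, ← List.map_reverse,
    List.foldl_map, pv_setI_natCast, pv_cellI_natCast]
  rw [← pv_cellsCM_flatten, ← pv_cellsRMrev]
  simp only [List.foldl_flatMap, List.foldl_map, pvStep2, pvStep3, pvG0, pvWAt]

theorem pv_portB (u : String) (N : Nat) :
    fillBlockDe_alt u (N : Int) =
      pvGridB N (((N : Int)) ^ 2 - ((pvWord u).length : Int)) (pvWord u) (List.range N)
        (max 0 (((pvWord u).length : Int) - ((N : Int)) ^ 2)) := by
  unfold fillBlockDe_alt
  simp only [PySem.List.pyRange_zero_nat, List.foldl_map]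
  set ns : Int := ((N : Int)) ^ 2 - PySem.List.len (pvWord u) with hns
  have hcong : ∀ (st : List (List String) × Int), ∀ r ∈ List.range N,
      (st.1 ++ [((List.range N).foldl (fun rc (c : Nat) =>
          if (c : Int) * (N : Int) + ((N : Int) - 1 - (r : Int)) < ns then (rc.1 ++ ["*"], rc.2)
          else (rc.1 ++ [PySem.List.pyGetD (pvWord u) rc.2 ""], rc.2 + 1))
          (([] : List String), st.2)).1],
        ((List.range N).foldl (fun rc (c : Nat) =>
          if (c : Int) * (N : Int) + ((N : Int) - 1 - (r : Int)) < ns then (rc.1 ++ ["*"], rc.2)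
          else (rc.1 ++ [PySem.List.pyGetD (pvWord u) rc.2 ""], rc.2 + 1))
          (([] : List String), st.2)).2) =
      (st.1 ++ [((List.range N).foldl (fun rc (c : Nat) =>
          if pvStar N ns (r, c) then (rc.1 ++ ["*"], rc.2)
          else (rc.1 ++ [pvWAt (pvWord u) rc.2], rc.2 + 1))
          (([] : List String), st.2)).1],
        ((List.range N).foldl (fun rc (c : Nat) =>
          if pvStar N ns (r, c) then (rc.1 ++ ["*"], rc.2)
          else (rc.1 ++ [pvWAt (pvWord u) rc.2], rc.2 + 1))
          (([] : List String), st.2)).2) := by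
    intro st r hr
    have hrN : r < N := List.mem_range.mp hr
    have hinner : ∀ (init : List String × Int),
        (List.range N).foldl (fun rc (c : Nat) =>
          if (c : Int) * (N : Int) + ((N : Int) - 1 - (r : Int)) < ns then (rc.1 ++ ["*"], rc.2)
          else (rc.1 ++ [PySem.List.pyGetD (pvWord u) rc.2 ""], rc.2 + 1)) init =
        (List.range N).foldl (fun rc (c : Nat) =>
          if pvStar N ns (r, c) then (rc.1 ++ ["*"], rc.2)
          else (rc.1 ++ [pvWAt (pvWord u) rc.2], rc.2 + 1)) init := by
      intro init
      refine pv_foldl_congr _ _ _ _ ?_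
      intro rc c hc
      have hcN : c < N := List.mem_range.mp hc
      have hidx : (c : Int) * (N : Int) + ((N : Int) - 1 - (r : Int))
          = ((pvColIdx N (r, c) : Nat) : Int) := by
        rw [pvColIdx]
        push_cast
        omega
      rw [hidx]
      have hiff : (((pvColIdx N (r, c) : Nat) : Int) < ns) ↔ (pvStar N ns (r, c) = true) := by
        simp [pvStar]
      exact if_congr hiff rfl rfl
    rw [hinner]
  rw [pv_foldl_congr _ _ _ _ hcong, pv_foldB_outer]
  simp [hns, PySem.List.len_eq]

-- ===== VERDICT (by name: the statement is the Claim_ definition above) =====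
theorem fillBlockDe_spec : Claim_equal_fillBlockDe := by
  intro u n _
  show fillBlockDe u n = fillBlockDe_alt u n
  by_cases hn : 0 ≤ n
  · obtain ⟨N, rfl⟩ : ∃ N : Nat, n = (N : Int) := ⟨n.toNat, (Int.toNat_of_nonneg hn).symm⟩
    rw [pv_portA, pv_portB]
    have hsq : ((N : Int)) ^ 2 = ((N * N : Nat) : Int) := by push_cast; ring
    rw [hsq]
    exact pv_main N (pvWord u) _ rfl
  · have h1 : PySem.List.pyRange 0 n = [] := by
      rw [PySem.List.pyRange_zero]
      have h2 : n.toNat = 0 := by omega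
      rw [h2]
      rfl
    simp [fillBlockDe, fillBlockDe_alt, h1]
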